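-- pv_equiv track=rewrite | github.com/Vortexx2/DSA-questions | sample-questions/lex.py | lexSmallestString
-- ===== SOURCE A (Python) =====
-- from collections import deque
--
-- def lexSmallestString(input1: int, input2: str) -> str:
--   """
--     Let there be 3 robots: A, B and C.
--     A has a string `input2` of length `input1`.
--     A can append letters to B only through the front of the string.
--     B can append letters to C only through the end of the string.
--     Find the lexicographically smallest string C can have
--
--     Ex: "dad" ---- ans ----> "add"
--     Ex: "cba" ---- ans ----> "abc"
--   """
--
--   length = input1
--
--   if not input1:
--     return ""
--
--   prevSmallest = length - 1
--   dic = {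
--       prevSmallest: False
--   }
--
--   for i in range(length - 2, -1, -1):
--     if input2[i] < input2[prevSmallest]:
--       dic[i] = False
--       prevSmallest = i
--
--     else:
--       dic[i] = True
--
--   b, ans = deque(), ""
--
--   for i, char in enumerate(input2):
--     b.append(i)
--
--     if dic[i]:
--       continue
--
--     while b and not dic[b[-1]]:
--       ans += input2[b.pop()]
--
--   while b:
--     ans += input2[b.pop()]
--   return ans
-- ===== SOURCE B (Python) =====
-- def lexSmallestString(input1: int, input2: str) -> str:
--   # Single reverse index pass with a running minimum (the last character is
--   # always a suffix minimum, so it seeds both the minimum and the front part):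
--   # characters that are strict minima of everything to their right go to the
--   # front part (kept in original order), all others go to the back part (in
--   # reverse order).  No dict of flags, no deque/stack simulation.
--   if not input1:
--     return ""
--
--   m = input2[input1 - 1]
--   front, back = [m], []
--   for i in range(input1 - 2, -1, -1):
--     c = input2[i]
--     if c < m:
--       front.append(c)
--       m = c
--     else:
--       back.append(c)
--
--   front.reverse()
--   return "".join(front) + "".join(back)
-- ===== Notes on version B (the rewrite author's own statement) =====
-- stated objective: simpler
-- what changed: A precomputes a dict of suffix-minimum flags and then simulates a deque-based stack over enumerate(input2) with an inner pop loop; B is a single reverse index pass with a running minimum and two plain accumulators (front/back), with no dict and no stack at all.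
-- outside the precondition, e.g. on lexSmallestString(1, ''): A returns '', B raises IndexError; on lexSmallestString(-1, ''): A returns '', B raises IndexError
import Mathlib
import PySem

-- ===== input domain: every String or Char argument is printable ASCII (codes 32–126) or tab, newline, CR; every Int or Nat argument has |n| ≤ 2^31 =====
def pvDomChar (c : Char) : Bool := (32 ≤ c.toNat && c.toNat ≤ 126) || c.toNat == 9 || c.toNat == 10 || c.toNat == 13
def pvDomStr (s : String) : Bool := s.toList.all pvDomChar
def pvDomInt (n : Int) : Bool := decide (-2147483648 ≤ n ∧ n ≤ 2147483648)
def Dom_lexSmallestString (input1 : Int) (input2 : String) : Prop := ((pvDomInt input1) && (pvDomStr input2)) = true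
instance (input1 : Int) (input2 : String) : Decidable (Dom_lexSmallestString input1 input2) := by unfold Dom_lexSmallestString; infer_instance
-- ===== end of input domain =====

-- B replaces A's flag-dictionary + deque stack simulation by a single reverse
-- pass with a running minimum and two accumulators (objective: simpler).

-- ===== PORT A =====
-- while b and not dic[b[-1]]: ans += input2[b.pop()]   (stack top at head;
-- dic[...] ported as getD false: under Pre_ every index on the stack is a key)
def lexApop (s : List Char) (dic : PySem.Dict Int Bool) : List Int → List Char → List Int × List Char
  | [], ans => ([], ans)
  | j :: rest, ans =>
    if dic.getD j false = false then
      lexApop s dic rest (ans ++ [PySem.List.pyGetD s j ' '])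
    else (j :: rest, ans)

-- Python string concatenation `ans += c` is ported as List Char append, the
-- result converted once with String.ofList at the return.
def lexSmallestString (input1 : Int) (input2 : String) : String :=
  let length := input1
  if input1 == 0 then ""        -- `if not input1: return ""`
  else
    let s := input2.toList
    let prevSmallest := length - 1
    let dic : PySem.Dict Int Bool := (PySem.Dict.empty).insert prevSmallest false
    -- for i in range(length - 2, -1, -1): ...   (input2[i] as pyGetD: in range under Pre_)
    let st := (PySem.List.pyRange (length - 2) (-1) (-1)).foldl
      (fun (st : Int × PySem.Dict Int Bool) i =>
        if PySem.List.pyGetD s i ' ' < PySem.List.pyGetD s st.1 ' ' then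
          (i, st.2.insert i false)
        else
          (st.1, st.2.insert i true)) (prevSmallest, dic)
    let dic := st.2
    -- for i, char in enumerate(input2): ...
    let st2 := (PySem.List.enumerate s).foldl
      (fun (st2 : List Int × List Char) p =>
        let b := p.1 :: st2.1                                  -- b.append(i)
        if dic.getD p.1 false then (b, st2.2)                  -- if dic[i]: continue
        else lexApop s dic b st2.2) ([], [])
    -- while b: ans += input2[b.pop()]
    let fin := st2.1.foldl (fun ans j => ans ++ [PySem.List.pyGetD s j ' ']) st2.2
    String.ofList fin

-- ===== PORT B =====
-- state = (front, back, running minimum m); `"".join` / `+` become String.ofList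
def lexSmallestString_alt (input1 : Int) (input2 : String) : String :=
  if input1 == 0 then ""
  else
    -- m = input2[input1 - 1]; for i in range(input1 - 2, -1, -1): c = input2[i]; ...
    -- (indexing as pyGetD: in range under Pre_'s main case input1 = len(input2))
    let m0 := PySem.List.pyGetD input2.toList (input1 - 1) ' '
    let st := (PySem.List.pyRange (input1 - 2) (-1) (-1)).foldl
      (fun (st : List Char × List Char × Char) i =>
        let c := PySem.List.pyGetD input2.toList i ' '
        if c < st.2.2 then
          (st.1 ++ [c], st.2.1, c)
        else
          (st.1, st.2.1 ++ [c], st.2.2)) ([m0], [], m0)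
    String.ofList (st.1.reverse ++ st.2.1)

-- ===== PRECONDITION & SPEC =====
-- Pre_ is where both programs return: A raises KeyError/IndexError whenever
-- input1 differs from len(input2) except for input1 == 0 (early guard), and
-- on the inconsistent inputs (input1 <= 1 with empty input2) where A happens
-- to return "" without ever indexing, B's natural index access raises.
def Pre_lexSmallestString (input1 : Int) (input2 : String) : Prop :=
  input1 = PySem.Str.len input2 ∨ input1 = 0
instance (input1 : Int) (input2 : String) : Decidable (Pre_lexSmallestString input1 input2) := by
  unfold Pre_lexSmallestString; infer_instance

def pvWitness_lexSmallestString : Int × String := (3, "dad")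

def Spec_lexSmallestString (input1 : Int) (input2 : String) (out : String) : Prop := out = lexSmallestString_alt input1 input2
instance (input1 : Int) (input2 : String) (out : String) : Decidable (Spec_lexSmallestString input1 input2 out) := by unfold Spec_lexSmallestString; infer_instance

-- ===== CLAIM (what is proved, stated in full; the proofs are below) =====
def Claim_equal_lexSmallestString : Prop := ∀ (input1 : Int) (input2 : String), Dom_lexSmallestString input1 input2 → Pre_lexSmallestString input1 input2 → Spec_lexSmallestString input1 input2 (lexSmallestString input1 input2)

-- ===== LEMMAS AND PROOFS =====

-- min of a list of chars, folded onto an initial optional minimum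
def pvCmb (c : Char) : Option Char → Option Char
  | none => some c
  | some m => some (if c < m then c else m)

def pvMinM (xs : List Char) (m : Option Char) : Option Char :=
  xs.foldr pvCmb m

-- classification flag of position i of l, given minimum m of what follows l:
-- true = "not a strict minimum of everything to its right" (A's dic[i])
def pvFlag (l : List Char) (m : Option Char) (i : Nat) : Bool :=
  match pvMinM (l.drop (i + 1)) m with
  | none => false
  | some mm => !(decide (l.getD i ' ' < mm))

def pvSel (l : List Char) (m : Option Char) (bv : Bool) : List Nat :=
  (List.range l.length).filter (fun i => pvFlag l m i = bv)

-- the common closed form both programs are reduced to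
def pvSpec (l : List Char) : List Char :=
  (pvSel l none false).map (l.getD · ' ') ++ ((pvSel l none true).reverse.map (l.getD · ' '))

theorem pvMinM_append (xs : List Char) (c : Char) (m : Option Char) :
    pvMinM (xs ++ [c]) m = pvMinM xs (pvCmb c m) := by
  simp [pvMinM]

theorem pvFlag_append_lt (l : List Char) (c : Char) (m : Option Char) (i : Nat)
    (hi : i < l.length) :
    pvFlag (l ++ [c]) m i = pvFlag l (pvCmb c m) i := by
  unfold pvFlag
  rw [List.drop_append_of_le_length (by omega), pvMinM_append,
      List.getD_append _ _ _ _ hi]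

theorem pvFlag_append_last (l : List Char) (c : Char) (m : Option Char) :
    pvFlag (l ++ [c]) m l.length =
      (match m with | none => false | some mm => !(decide (c < mm))) := by
  unfold pvFlag
  have h1 : (l ++ [c]).drop (l.length + 1) = [] := by
    apply List.drop_eq_nil_of_le; simp
  have h2 : (l ++ [c]).getD l.length ' ' = c := by
    simp [List.getD]
  rw [h1, h2]
  cases m <;> simp [pvMinM]

theorem pvSel_append (l : List Char) (c : Char) (m : Option Char) (bv : Bool) :
    pvSel (l ++ [c]) m bv =
      (pvSel l (pvCmb c m) bv) ++
        (if pvFlag (l ++ [c]) m l.length = bv then [l.length] else []) := by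
  unfold pvSel
  rw [show (l ++ [c]).length = l.length + 1 by simp, List.range_succ,
      List.filter_append]
  congr 1
  · apply List.filter_congr
    intro i hi
    rw [List.mem_range] at hi
    rw [pvFlag_append_lt l c m i hi]
  · rw [List.filter_singleton]
    by_cases h : pvFlag (l ++ [c]) m l.length = bv <;> simp [h]

-- ===== B side: the reverse foldl computes pvSel =====

theorem pvB_fold (l : List Char) (m : Option Char) (f0 b0 : List Char) :
    l.reverse.foldl
      (fun (st : List Char × List Char × Option Char) c =>
        if (match st.2.2 with | none => true | some mm => decide (c < mm)) then
          (st.1 ++ [c], st.2.1, some c)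
        else
          (st.1, st.2.1 ++ [c], st.2.2)) (f0, b0, m)
    = (f0 ++ (pvSel l m false).reverse.map (l.getD · ' '),
       b0 ++ (pvSel l m true).reverse.map (l.getD · ' '),
       pvMinM l m) := by
  induction l using List.reverseRecOn generalizing m f0 b0 with
  | nil => simp [pvSel, pvMinM, List.foldl_nil]
  | append_singleton l c ih =>
    rw [List.reverse_append]
    simp only [List.reverse_cons, List.reverse_nil, List.nil_append, List.cons_append,
      List.foldl_cons]
    by_cases hc : (match m with | none => true | some mm => decide (c < mm)) = true
    · rw [if_pos hc, ih (some c)]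
      have hcmb : pvCmb c m = some c := by
        cases m with
        | none => rfl
        | some mm => simp at hc; simp [pvCmb, hc]
      have hflag : pvFlag (l ++ [c]) m l.length = false := by
        rw [pvFlag_append_last]; cases m with
        | none => rfl
        | some mm => simp at hc ⊢; exact hc
      have hmap : ∀ bv : Bool, (pvSel (l ++ [c]) m bv).reverse.map ((l ++ [c]).getD · ' ')
          = (if pvFlag (l ++ [c]) m l.length = bv then [c] else [])
            ++ (pvSel l (pvCmb c m) bv).reverse.map (l.getD · ' ') := by
        intro bv
        rw [pvSel_append, List.reverse_append, List.map_append]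
        congr 1
        · split <;> simp [List.getD]
        · apply List.map_congr_left
          intro i hi
          simp only [List.mem_reverse, pvSel, List.mem_filter, List.mem_range] at hi
          exact List.getD_append _ _ _ _ hi.1
      rw [hmap false, hmap true, hflag]
      simp [hcmb, pvMinM_append]
    · rw [if_neg hc, ih m]
      obtain ⟨mm, rfl⟩ : ∃ mm, m = some mm := by
        cases m with
        | none => simp at hc
        | some mm => exact ⟨mm, rfl⟩
      simp only [decide_eq_true_eq] at hc
      have hcmb : pvCmb c (some mm) = some mm := by
        simp [pvCmb]; intro h; exact absurd h hc
      have hflag : pvFlag (l ++ [c]) (some mm) l.length = true := by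
        rw [pvFlag_append_last]; simpa using hc
      have hmap : ∀ bv : Bool, (pvSel (l ++ [c]) (some mm) bv).reverse.map ((l ++ [c]).getD · ' ')
          = (if pvFlag (l ++ [c]) (some mm) l.length = bv then [c] else [])
            ++ (pvSel l (pvCmb c (some mm)) bv).reverse.map (l.getD · ' ') := by
        intro bv
        rw [pvSel_append, List.reverse_append, List.map_append]
        congr 1
        · split <;> simp [List.getD]
        · apply List.map_congr_left
          intro i hi
          simp only [List.mem_reverse, pvSel, List.mem_filter, List.mem_range] at hi
          exact List.getD_append _ _ _ _ hi.1
      rw [hmap false, hmap true, hflag]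
      simp [hcmb, pvMinM_append]

theorem pvIdx_rev (l : List Char) :
    (PySem.List.pyRange ((l.length : Int) - 1) (-1) (-1)).map
      (fun i => PySem.List.pyGetD l i ' ') = l.reverse := by
  rw [PySem.List.pyRange_neg_one_eq_reverse,
      show (-1 : Int) + 1 = 0 by ring,
      show (l.length : Int) - 1 + 1 = (l.length : Int) by ring,
      List.map_reverse, PySem.List.map_pyGetD_pyRange_zero']

-- the reverse index range over the first length-1 positions yields dropLast.reverse
theorem pvIdx_rev_dropLast (l : List Char) (hl : l ≠ []) :
    (PySem.List.pyRange ((l.length : Int) - 2) (-1) (-1)).map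
      (fun i => PySem.List.pyGetD l i ' ') = l.dropLast.reverse := by
  have hn : 0 < l.length := List.length_pos_of_ne_nil hl
  have hr : ((l.dropLast.length : Int) - 1) = (l.length : Int) - 2 := by
    rw [List.length_dropLast]; omega
  have h1 := pvIdx_rev l.dropLast
  rw [hr] at h1
  rw [← h1]
  apply List.map_congr_left
  intro i hi
  rw [PySem.List.mem_pyRange_neg_one] at hi
  have h2 : i.toNat < l.dropLast.length := by rw [List.length_dropLast]; omega
  rw [PySem.List.pyGetD_eq_getElem l ' ' (by omega) (by rw [List.length_dropLast] at h2; exact_mod_cast (by omega : i ≤ (l.length : Int) - 2).trans_lt (by omega)),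
      PySem.List.pyGetD_eq_getElem l.dropLast ' ' (by omega) (by exact_mod_cast (by omega : i < (l.dropLast.length : Int)))]
  exact (List.getElem_dropLast h2).symm

-- the plain-Char running-minimum fold is the Option-state fold started at some m
theorem pvChr_opt :
    ∀ (xs : List Char) (f b : List Char) (m : Char),
      xs.foldl
        (fun (st : List Char × List Char × Option Char) c =>
          if (match st.2.2 with | none => true | some mm => decide (c < mm)) then
            (st.1 ++ [c], st.2.1, some c)
          else
            (st.1, st.2.1 ++ [c], st.2.2)) (f, b, some m)
      = (((xs.foldl
            (fun (st : List Char × List Char × Char) c =>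
              if c < st.2.2 then
                (st.1 ++ [c], st.2.1, c)
              else
                (st.1, st.2.1 ++ [c], st.2.2)) (f, b, m)).1,
          (xs.foldl
            (fun (st : List Char × List Char × Char) c =>
              if c < st.2.2 then
                (st.1 ++ [c], st.2.1, c)
              else
                (st.1, st.2.1 ++ [c], st.2.2)) (f, b, m)).2.1,
          some (xs.foldl
            (fun (st : List Char × List Char × Char) c =>
              if c < st.2.2 then
                (st.1 ++ [c], st.2.1, c)
              else
                (st.1, st.2.1 ++ [c], st.2.2)) (f, b, m)).2.2)) := by
  intro xs
  induction xs with
  | nil => intro f b m; rfl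
  | cons c rest ih =>
    intro f b m
    simp only [List.foldl_cons]
    by_cases hc : c < m
    · simpa [hc] using ih (f ++ [c]) b c
    · simpa [hc] using ih f (b ++ [c]) m

-- the port-B fold (index form, Char state, seeded with the last character)
-- computes the pvSel closed form
theorem pvB_fold_idx (l : List Char) (hl : l ≠ []) :
    (let m0 := PySem.List.pyGetD l ((l.length : Int) - 1) ' '
     let st := (PySem.List.pyRange ((l.length : Int) - 2) (-1) (-1)).foldl
      (fun (st : List Char × List Char × Char) i =>
        let c := PySem.List.pyGetD l i ' '
        if c < st.2.2 then
          (st.1 ++ [c], st.2.1, c)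
        else
          (st.1, st.2.1 ++ [c], st.2.2)) ([m0], [], m0)
     st.1.reverse ++ st.2.1)
    = ((pvSel l none false).reverse.map (l.getD · ' ')).reverse
        ++ (pvSel l none true).reverse.map (l.getD · ' ') := by
  have hn : 0 < l.length := List.length_pos_of_ne_nil hl
  have hm0 : PySem.List.pyGetD l ((l.length : Int) - 1) ' ' = l.getLast hl := by
    rw [show ((l.length : Int) - 1) = ((l.length - 1 : Nat) : Int) by omega,
        PySem.List.pyGetD_natCast, List.getD_eq_getElem _ _ (by omega),
        List.getLast_eq_getElem]
  have hsplit : l.reverse = l.getLast hl :: l.dropLast.reverse := by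
    conv_lhs => rw [← List.dropLast_concat_getLast hl]
    rw [List.reverse_append, List.reverse_singleton]
    rfl
  have hopt := pvB_fold l none [] []
  rw [hsplit, List.foldl_cons] at hopt
  simp only [List.nil_append] at hopt
  -- the first fold step on the literal initial state reduces definitionally
  have hopt2 : l.dropLast.reverse.foldl
      (fun (st : List Char × List Char × Option Char) c =>
        if (match st.2.2 with | none => true | some mm => decide (c < mm)) then
          (st.1 ++ [c], st.2.1, some c)
        else
          (st.1, st.2.1 ++ [c], st.2.2)) ([l.getLast hl], [], some (l.getLast hl))
      = ((pvSel l none false).reverse.map (l.getD · ' '),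
         (pvSel l none true).reverse.map (l.getD · ' '),
         pvMinM l none) := hopt
  rw [pvChr_opt l.dropLast.reverse [l.getLast hl] [] (l.getLast hl)] at hopt2
  -- hopt now pins the three components of the Char-state fold
  have h1 := congrArg (fun p : List Char × List Char × Option Char => p.1) hopt2
  have h2 := congrArg (fun p : List Char × List Char × Option Char => p.2.1) hopt2
  dsimp only at h1 h2
  dsimp only
  rw [show (PySem.List.pyRange ((l.length : Int) - 2) (-1) (-1)).foldl
      (fun (st : List Char × List Char × Char) i =>
        let c := PySem.List.pyGetD l i ' '
        if c < st.2.2 then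
          (st.1 ++ [c], st.2.1, c)
        else
          (st.1, st.2.1 ++ [c], st.2.2)) ([PySem.List.pyGetD l ((l.length : Int) - 1) ' '], [], PySem.List.pyGetD l ((l.length : Int) - 1) ' ')
      = l.dropLast.reverse.foldl
      (fun (st : List Char × List Char × Char) c =>
        if c < st.2.2 then
          (st.1 ++ [c], st.2.1, c)
        else
          (st.1, st.2.1 ++ [c], st.2.2)) ([l.getLast hl], [], l.getLast hl) from by
    rw [hm0, ← pvIdx_rev_dropLast l hl, List.foldl_map]]
  rw [h1, h2]

-- ===== A side =====

theorem lexApop_of_all_true (s : List Char) (dic : PySem.Dict Int Bool)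
    (b : List Int) (ans : List Char) (h : ∀ j ∈ b, dic.getD j false = true) :
    lexApop s dic b ans = (b, ans) := by
  cases b with
  | nil => rfl
  | cons j rest =>
    have := h j (by simp)
    unfold lexApop
    simp [this]

-- phase 1: the dictionary holds pvFlag for every index ≥ k
theorem pvA_phase1 (l : List Char) :
    ∀ (k : Nat) (ps : Nat) (dic : PySem.Dict Int Bool),
      k ≤ ps → ps < l.length →
      some (l.getD ps ' ') = pvMinM (l.drop k) none →
      (∀ j : Nat, k ≤ j → j < l.length → dic.getD (j : Int) false = pvFlag l none j) →
      (∀ j : Nat, j < l.length →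
        ((PySem.List.pyRange ((k : Int) - 1) (-1) (-1)).foldl
          (fun (st : Int × PySem.Dict Int Bool) i =>
            if PySem.List.pyGetD l i ' ' < PySem.List.pyGetD l st.1 ' ' then
              (i, st.2.insert i false)
            else
              (st.1, st.2.insert i true)) ((ps : Int), dic)).2.getD (j : Int) false
          = pvFlag l none j) := by
  intro k
  induction k with
  | zero =>
    intro ps dic _ _ _ hdic j hj
    rw [PySem.List.pyRange_neg_one_eq_nil (by omega)]
    exact hdic j (by omega) hj
  | succ k ih =>
    intro ps dic hk hps hmin hdic j hj
    have hkn : k < l.length := by omega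
    have hcast : ((k + 1 : Nat) : Int) - 1 = (k : Int) := by push_cast; ring
    rw [hcast, PySem.List.pyRange_neg_one_cons (by omega : (-1 : Int) < (k : Int))]
    have hdropk : l.drop k = l.getD k ' ' :: l.drop (k + 1) := by
      rw [List.drop_eq_getElem_cons hkn, List.getD_eq_getElem _ _ hkn]
    have hflagk : pvFlag l none k = !(decide (l.getD k ' ' < l.getD ps ' ')) := by
      unfold pvFlag
      rw [← hmin]
    rw [List.foldl_cons]
    simp only [PySem.List.pyGetD_natCast]
    by_cases hlt : l.getD k ' ' < l.getD ps ' '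
    · have hlt2 : l[k]?.getD ' ' < l[ps]?.getD ' ' := by simpa using hlt
      rw [if_pos hlt]
      refine ih k (dic.insert ((k : Nat) : Int) false) le_rfl hkn ?_ ?_ j hj
      · rw [hdropk]
        unfold pvMinM at hmin ⊢
        rw [List.foldr_cons, ← hmin]
        simp [pvCmb, hlt2]
      · intro j2 h1 h2
        rw [PySem.Dict.getD_insert]
        by_cases he : (j2 : Int) = (k : Int)
        · have hjk : j2 = k := by exact_mod_cast he
          subst hjk
          rw [if_pos rfl, hflagk]
          simp [hlt2]
        · rw [if_neg he]
          have hne : j2 ≠ k := fun h => he (by rw [h])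
          exact hdic j2 (by omega) h2
    · have hlt2 : ¬ l[k]?.getD ' ' < l[ps]?.getD ' ' := by simpa using hlt
      rw [if_neg hlt]
      refine ih ps (dic.insert ((k : Nat) : Int) true) (by omega) hps ?_ ?_ j hj
      · rw [hdropk]
        unfold pvMinM at hmin ⊢
        rw [List.foldr_cons, ← hmin]
        simp [pvCmb, hlt2]
      · intro j2 h1 h2
        rw [PySem.Dict.getD_insert]
        by_cases he : (j2 : Int) = (k : Int)
        · have hjk : j2 = k := by exact_mod_cast he
          subst hjk
          rw [if_pos rfl, hflagk]
          simp [hlt2]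
        · rw [if_neg he]
          have hne : j2 ≠ k := fun h => he (by rw [h])
          exact hdic j2 (by omega) h2

-- phase 2 invariant over the ascending enumerate fold
theorem pvA_phase2 (l : List Char) (dic : PySem.Dict Int Bool)
    (hdic : ∀ j : Nat, j < l.length → dic.getD (j : Int) false = pvFlag l none j) :
    ∀ (i : Nat), i ≤ l.length →
      ((PySem.List.pyRange 0 (i : Int)).map (fun j => (j, PySem.List.pyGetD l j ' '))).foldl
        (fun (st2 : List Int × List Char) p =>
          let b := p.1 :: st2.1
          if dic.getD p.1 false then (b, st2.2)
          else lexApop l dic b st2.2) ([], [])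
      = (((List.range i).filter (fun j => pvFlag l none j = true)).reverse.map Int.ofNat,
         ((List.range i).filter (fun j => pvFlag l none j = false)).map (l.getD · ' ')) := by
  intro i
  induction i with
  | zero => intro _; simp
  | succ i ih =>
    intro hi
    have hin : i < l.length := by omega
    have hcast : ((i + 1 : Nat) : Int) = (i : Int) + 1 := by push_cast; ring
    rw [hcast, PySem.List.pyRange_one_succ_right (by omega : (0 : Int) ≤ (i : Int)),
        List.map_append, List.foldl_append]
    rw [ih (by omega)]
    have hflag := hdic i hin
    simp only [List.foldl_cons, List.foldl_nil, List.map_cons, List.map_nil,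
      PySem.List.pyGetD_natCast]
    by_cases hb : pvFlag l none i = true
    · rw [hflag, hb]
      simp [List.range_succ, List.filter_append, hb]
    · simp only [Bool.not_eq_true] at hb
      rw [hflag, hb]
      simp only [Bool.false_eq_true, if_false]
      have hpop : lexApop l dic
          (((i : Nat) : Int) :: ((List.range i).filter (fun j => pvFlag l none j = true)).reverse.map Int.ofNat)
          (((List.range i).filter (fun j => pvFlag l none j = false)).map (l.getD · ' '))
          = (((List.range i).filter (fun j => pvFlag l none j = true)).reverse.map Int.ofNat,
             ((List.range i).filter (fun j => pvFlag l none j = false)).map (l.getD · ' ') ++ [PySem.List.pyGetD l ((i : Nat) : Int) ' ']) := by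
        unfold lexApop
        rw [hflag, hb]
        simp only [if_pos]
        apply lexApop_of_all_true
        intro j hjmem
        rw [List.mem_map] at hjmem
        obtain ⟨j2, hj2mem, hj2eq⟩ := hjmem
        rw [List.mem_reverse, List.mem_filter, List.mem_range] at hj2mem
        obtain ⟨hj2i, hj2f⟩ := hj2mem
        subst hj2eq
        show dic.getD ((j2 : Nat) : Int) false = true
        rw [hdic j2 (by omega)]
        simpa using hj2f
      rw [hpop]
      simp [List.range_succ, List.filter_append, hb]

theorem pv_main (l : List Char) (hl : l ≠ []) :
    (let s := l
     let st := (PySem.List.pyRange ((l.length : Int) - 2) (-1) (-1)).foldl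
       (fun (st : Int × PySem.Dict Int Bool) i =>
         if PySem.List.pyGetD s i ' ' < PySem.List.pyGetD s st.1 ' ' then
           (i, st.2.insert i false)
         else
           (st.1, st.2.insert i true))
       (((l.length : Int) - 1), (PySem.Dict.empty).insert ((l.length : Int) - 1) false)
     let dic := st.2
     let st2 := (PySem.List.enumerate s).foldl
       (fun (st2 : List Int × List Char) p =>
         let b := p.1 :: st2.1
         if dic.getD p.1 false then (b, st2.2)
         else lexApop s dic b st2.2) ([], [])
     st2.1.foldl (fun ans j => ans ++ [PySem.List.pyGetD s j ' ']) st2.2)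
    = pvSpec l := by
  have hn : 0 < l.length := List.length_pos_of_ne_nil hl
  have hc : ((l.length - 1 : Nat) : Int) = (l.length : Int) - 1 := by omega
  have hc2 : (l.length : Int) - 1 - 1 = (l.length : Int) - 2 := by ring
  have hmin0 : some (l.getD (l.length - 1) ' ') = pvMinM (l.drop (l.length - 1)) none := by
    rw [List.drop_eq_getElem_cons (by omega), List.getD_eq_getElem _ _ (by omega)]
    have hd : l.length - 1 + 1 = l.length := by omega
    rw [hd, List.drop_length]
    simp [pvMinM, pvCmb]
  have hdic0 : ∀ j : Nat, l.length - 1 ≤ j → j < l.length →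
      ((PySem.Dict.empty).insert ((l.length : Int) - 1) false : PySem.Dict Int Bool).getD (j : Int) false
        = pvFlag l none j := by
    intro j hj1 hj2
    have hj : j = l.length - 1 := by omega
    subst hj
    rw [PySem.Dict.getD_insert, if_pos (by omega)]
    unfold pvFlag
    have hd : l.drop (l.length - 1 + 1) = [] := List.drop_eq_nil_of_le (by omega)
    rw [hd]
    rfl
  have hdic := pvA_phase1 l (l.length - 1) (l.length - 1)
    ((PySem.Dict.empty).insert ((l.length : Int) - 1) false) le_rfl (by omega) hmin0 hdic0
  rw [hc, hc2] at hdic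
  have h2 := pvA_phase2 l _ hdic l.length le_rfl
  have hlen : PySem.List.len l = (l.length : Int) := by simp
  dsimp only
  rw [PySem.List.enumerate_eq_map_pyRange l ' ', hlen, h2,
      PySem.List.foldl_append_singleton_eq_map, List.map_map]
  unfold pvSpec pvSel
  congr 1
  apply List.map_congr_left
  intro j hj
  simp

-- ===== VERDICT (by name: the statement is the Claim_ definition above) =====
theorem lexSmallestString_spec : Claim_equal_lexSmallestString := by
  intro input1 input2 _ hpre
  unfold Spec_lexSmallestString
  by_cases h0 : input1 = 0
  · subst h0
    simp [lexSmallestString, lexSmallestString_alt]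
  · have hguard : (input1 == 0) = false := by simp [h0]
    rcases hpre with hlen | h0'
    · have hlen' : input1 = (input2.toList.length : Int) := by simpa using hlen
      have hne : input2.toList ≠ [] := by
        intro h
        rw [h] at hlen'
        simp at hlen'
        exact h0 hlen'
      unfold lexSmallestString lexSmallestString_alt
      rw [hguard]
      simp only [Bool.false_eq_true, if_false]
      rw [hlen']
      rw [pv_main input2.toList hne, pvB_fold_idx input2.toList hne]
      simp [pvSpec]
    · exact absurd h0' h0
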